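-- pv_equiv track=rewrite | github.com/socathie/CodeFights | Challenges/closestSequence2.py | closestSequence2
-- ===== SOURCE A (Python) =====
-- def closestSequence2(a, b):
--     n = len(a)
--     m = len(b)
--     dp = [[0 for c in range(m)] for r in range(n)]
--
--     for i in range(n):
--         for j in range(m):
--             if i==0:
--                 dp[i][j]=abs(b[j]-a[0])
--             elif j>i:
--                 dp[i][j] = min(dp[i][j-1],dp[i-1][j-1]+abs(a[i]-b[j]))
--             elif j==i:
--                 dp[i][j] = dp[i-1][j-1]+abs(a[i]-b[j])
--
--     return dp[n-1][m-1]
-- ===== SOURCE B (Python) =====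
-- def closestSequence2(a, b):
--     memo = {}
--
--     def rec(i, j):
--         key = (i, j)
--         if key in memo:
--             return memo[key]
--         if i == 0:
--             v = abs(b[j] - a[0])
--         elif j < i:
--             v = 0
--         elif j == i:
--             v = rec(i - 1, j - 1) + abs(a[i] - b[j])
--         else:
--             v = min(rec(i, j - 1), rec(i - 1, j - 1) + abs(a[i] - b[j]))
--         memo[key] = v
--         return v
--
--     return rec(len(a) - 1, len(b) - 1)
-- ===== Notes on version B (the rewrite author's own statement) =====
-- stated objective: faster
-- what changed: Replaces A's eagerly filled bottom-up 2D DP table (nested index loops mutating dp[i][j]) with a top-down memoized recursion rec(i,j) started from the answer cell, so only cells the answer depends on are ever computed.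
import Mathlib
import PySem

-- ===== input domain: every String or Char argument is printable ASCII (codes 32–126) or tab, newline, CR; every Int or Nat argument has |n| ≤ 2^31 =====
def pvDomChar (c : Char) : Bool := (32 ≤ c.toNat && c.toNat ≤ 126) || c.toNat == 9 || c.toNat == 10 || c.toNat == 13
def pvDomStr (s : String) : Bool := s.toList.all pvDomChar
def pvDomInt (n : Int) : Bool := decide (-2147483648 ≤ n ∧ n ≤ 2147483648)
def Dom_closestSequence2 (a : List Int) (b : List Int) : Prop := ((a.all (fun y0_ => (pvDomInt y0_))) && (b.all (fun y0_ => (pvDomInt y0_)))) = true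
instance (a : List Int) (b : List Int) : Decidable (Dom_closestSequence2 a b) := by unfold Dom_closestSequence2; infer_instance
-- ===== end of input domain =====

-- B replaces A's eager bottom-up row-by-row DP table with top-down recursion on (i,j)
-- started from the answer cell, computing only cells the answer depends on (objective: faster).

-- ===== PORT A =====
-- 2D-table read dp[i][j]; every access A makes on an input admitted by Pre_ is in range,
-- so the getD defaults are never hit there.
def pvGet2 (dp : List (List Int)) (i j : Nat) : Int := (dp.getD i []).getD j 0

-- 2D-table write dp[i][j] = v
def pvSet2 (dp : List (List Int)) (i j : Nat) (v : Int) : List (List Int) :=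
  dp.set i ((dp.getD i []).set j v)

-- the body of A's inner loop, branch for branch
def pvStepA (a b : List Int) (i : Nat) (dp : List (List Int)) (j : Nat) : List (List Int) :=
  if i = 0 then pvSet2 dp i j |b.getD j 0 - a.getD 0 0|
  else if j > i then
    pvSet2 dp i j (min (pvGet2 dp i (j-1)) (pvGet2 dp (i-1) (j-1) + |a.getD i 0 - b.getD j 0|))
  else if j = i then
    pvSet2 dp i j (pvGet2 dp (i-1) (j-1) + |a.getD i 0 - b.getD j 0|)
  else dp

def closestSequence2 (a : List Int) (b : List Int) : Int :=
  let n := a.length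
  let m := b.length
  let dp0 : List (List Int) := (List.range n).map (fun _ => (List.range m).map (fun _ => (0:Int)))
  let dp := (List.range n).foldl (fun dp i => (List.range m).foldl (pvStepA a b i) dp) dp0
  pvGet2 dp (n-1) (m-1)

-- ===== PORT B =====
-- Source B's helper rec(i,j), same branches in the same order (the memo cache is dropped:
-- it only avoids recomputation and does not change the value)
def pvRecB (a b : List Int) : Nat → Nat → Int
  | 0, j => |b.getD j 0 - a.getD 0 0|
  | (i+1), j =>
    if j < i+1 then 0
    else if j = i+1 then pvRecB a b i (j-1) + |a.getD (i+1) 0 - b.getD j 0|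
    else min (pvRecB a b (i+1) (j-1)) (pvRecB a b i (j-1) + |a.getD (i+1) 0 - b.getD j 0|)
  termination_by i j => (i, j)

def closestSequence2_alt (a : List Int) (b : List Int) : Int :=
  pvRecB a b (a.length - 1) (b.length - 1)

-- ===== PRECONDITION & SPEC =====
-- Pre_ excludes exactly the inputs on which A raises IndexError: empty a (dp[-1] on the
-- empty table) or empty b (indexing an empty row).
def Pre_closestSequence2 (a : List Int) (b : List Int) : Prop := a ≠ [] ∧ b ≠ []
instance (a : List Int) (b : List Int) : Decidable (Pre_closestSequence2 a b) := by
  unfold Pre_closestSequence2; infer_instance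

def pvWitness_closestSequence2 : List Int × List Int := ([3, 1], [2, 5, 7])

def Spec_closestSequence2 (a : List Int) (b : List Int) (out : Int) : Prop := out = closestSequence2_alt a b
instance (a : List Int) (b : List Int) (out : Int) : Decidable (Spec_closestSequence2 a b out) := by unfold Spec_closestSequence2; infer_instance

-- ===== CLAIM (what is proved, stated in full; the proofs are below) =====
def Claim_equal_closestSequence2 : Prop := ∀ (a : List Int) (b : List Int), Dom_closestSequence2 a b → Pre_closestSequence2 a b → Spec_closestSequence2 a b (closestSequence2 a b)

-- ===== LEMMAS AND PROOFS =====

-- table shape: n rows, each of length m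
def pvShape (dp : List (List Int)) (n m : Nat) : Prop :=
  dp.length = n ∧ ∀ r < n, (dp.getD r []).length = m

theorem pvGet2_set2_same (dp : List (List Int)) (i j : Nat) (v : Int)
    (hi : i < dp.length) (hj : j < (dp.getD i []).length) :
    pvGet2 (pvSet2 dp i j v) i j = v := by
  simp only [pvGet2, pvSet2, List.getD_eq_getElem?_getD] at hj ⊢
  rw [List.getElem?_set_self hi]
  simp only [Option.getD_some]
  rw [List.getElem?_set_self hj, Option.getD_some]

theorem pvGet2_set2_ne (dp : List (List Int)) (i j i' j' : Nat) (v : Int)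
    (h : i ≠ i' ∨ j ≠ j') :
    pvGet2 (pvSet2 dp i j v) i' j' = pvGet2 dp i' j' := by
  simp only [pvGet2, pvSet2, List.getD_eq_getElem?_getD]
  by_cases hii : i = i'
  · subst hii
    have hjj : j ≠ j' := h.resolve_left (fun hc => hc rfl)
    by_cases hlen : i < dp.length
    · rw [List.getElem?_set_self hlen]
      simp only [Option.getD_some]
      rw [List.getElem?_set_ne hjj]
    · have h1 : (dp.set i ((dp[i]?.getD []).set j v))[i]? = none := by
        rw [List.getElem?_set]; simp [hlen]
      have h2 : dp[i]? = none := List.getElem?_eq_none (by omega)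
      rw [h1, h2]
  · rw [List.getElem?_set_ne hii]

theorem pvShape_set2 (dp : List (List Int)) (n m i j : Nat) (v : Int)
    (hs : pvShape dp n m) : pvShape (pvSet2 dp i j v) n m := by
  obtain ⟨hlen, hrow⟩ := hs
  refine ⟨by simpa [pvSet2] using hlen, ?_⟩
  intro r hr
  simp only [pvSet2, List.getD_eq_getElem?_getD] at hrow ⊢
  by_cases hir : i = r
  · subst hir
    have hlt : i < dp.length := by omega
    rw [List.getElem?_set_self hlt]
    simp only [Option.getD_some, List.length_set]
    exact hrow i hr
  · rw [List.getElem?_set_ne hir]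
    exact hrow r hr

-- filling one row: after processing columns 0..k-1 of row i, row i agrees with pvRecB
-- below k and is still 0 from k on; other rows are untouched
theorem pvInner (a b : List Int) (n m i : Nat) (hin : i < n) (k : Nat) (hk : k ≤ m)
    (dp : List (List Int)) (hs : pvShape dp n m)
    (hprev : ∀ i' < i, ∀ j < m, pvGet2 dp i' j = pvRecB a b i' j)
    (hzero : ∀ j, pvGet2 dp i j = 0) :
    pvShape ((List.range k).foldl (pvStepA a b i) dp) n m ∧
    (∀ i' j, i' ≠ i → pvGet2 ((List.range k).foldl (pvStepA a b i) dp) i' j = pvGet2 dp i' j) ∧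
    (∀ j' < k, pvGet2 ((List.range k).foldl (pvStepA a b i) dp) i j' = pvRecB a b i j') ∧
    (∀ j', k ≤ j' → pvGet2 ((List.range k).foldl (pvStepA a b i) dp) i j' = 0) := by
  induction k with
  | zero =>
      refine ⟨hs, fun _ _ _ => rfl, fun j' hj' => absurd hj' (Nat.not_lt_zero _), fun j' _ => hzero j'⟩
  | succ k ih =>
      have hk' : k ≤ m := Nat.le_of_succ_le hk
      obtain ⟨ihs, ihother, ihfill, ihzero⟩ := ih hk'
      set dpk := (List.range k).foldl (pvStepA a b i) dp with hdpk
      have hfold : (List.range (k+1)).foldl (pvStepA a b i) dp = pvStepA a b i dpk k := by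
        rw [List.range_succ, List.foldl_append, List.foldl_cons, List.foldl_nil]
      rw [hfold]
      have hkm : k < m := hk
      have hdplen : i < dpk.length := by rw [ihs.1]; exact hin
      have hrowlen : (dpk.getD i []).length = m := ihs.2 i hin
      have hkrow : k < (dpk.getD i []).length := by omega
      rcases Nat.eq_zero_or_pos i with hi0 | hipos
      · subst hi0
        have hstep : pvStepA a b 0 dpk k = pvSet2 dpk 0 k |b.getD k 0 - a.getD 0 0| := by
          simp [pvStepA]
        rw [hstep]
        refine ⟨pvShape_set2 _ _ _ _ _ _ ihs, ?_, ?_, ?_⟩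
        · intro i' j hne
          rw [pvGet2_set2_ne _ _ _ _ _ _ (Or.inl (fun hc => hne hc.symm))]
          exact ihother i' j hne
        · intro j' hj'
          rcases Nat.lt_succ_iff_lt_or_eq.mp hj' with h | h
          · rw [pvGet2_set2_ne _ _ _ _ _ _ (Or.inr (Nat.ne_of_gt h))]
            exact ihfill j' h
          · subst h
            rw [pvGet2_set2_same _ _ _ _ hdplen hkrow]
            simp [pvRecB]
        · intro j' hj'
          rw [pvGet2_set2_ne _ _ _ _ _ _ (Or.inr (by omega))]
          exact ihzero j' (by omega)
      · obtain ⟨i0, rfl⟩ : ∃ i0, i = i0 + 1 := ⟨i - 1, by omega⟩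
        have hkm1 : k - 1 < m := by omega
        rcases lt_trichotomy k (i0 + 1) with hlt | heq | hgt
        · -- j < i: the loop body writes nothing
          have hstep : pvStepA a b (i0+1) dpk k = dpk := by
            unfold pvStepA
            rw [if_neg (by omega), if_neg (by omega), if_neg (by omega)]
          rw [hstep]
          refine ⟨ihs, ihother, ?_, fun j' h => ihzero j' (by omega)⟩
          intro j' hj'
          rcases Nat.lt_succ_iff_lt_or_eq.mp hj' with h | h
          · exact ihfill j' h
          · subst h
            have : pvRecB a b (i0+1) j' = 0 := by simp [pvRecB, hlt]
            rw [this]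
            exact ihzero j' le_rfl
        · -- j = i: diagonal cell
          have hprev' : pvGet2 dpk i0 (k-1) = pvRecB a b i0 (k-1) := by
            rw [ihother i0 (k-1) (by omega)]
            exact hprev i0 (by omega) (k-1) hkm1
          have hstep : pvStepA a b (i0+1) dpk k
              = pvSet2 dpk (i0+1) k (pvGet2 dpk i0 (k-1) + |a.getD (i0+1) 0 - b.getD k 0|) := by
            unfold pvStepA
            rw [if_neg (by omega), if_neg (by omega), if_pos heq]
            simp
          rw [hstep]
          refine ⟨pvShape_set2 _ _ _ _ _ _ ihs, ?_, ?_, ?_⟩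
          · intro i' j hne
            rw [pvGet2_set2_ne _ _ _ _ _ _ (Or.inl (fun hc => hne hc.symm))]
            exact ihother i' j hne
          · intro j' hj'
            rcases Nat.lt_succ_iff_lt_or_eq.mp hj' with h | h
            · rw [pvGet2_set2_ne _ _ _ _ _ _ (Or.inr (Nat.ne_of_gt h))]
              exact ihfill j' h
            · subst h
              rw [pvGet2_set2_same _ _ _ _ hdplen hkrow, hprev']
              have : pvRecB a b (i0+1) j' = pvRecB a b i0 (j'-1) + |a.getD (i0+1) 0 - b.getD j' 0| := by
                rw [pvRecB]
                rw [if_neg (by omega), if_pos heq]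
              rw [this]
          · intro j' hj'
            rw [pvGet2_set2_ne _ _ _ _ _ _ (Or.inr (by omega))]
            exact ihzero j' (by omega)
        · -- j > i: min of left neighbour and diagonal
          have hprev' : pvGet2 dpk i0 (k-1) = pvRecB a b i0 (k-1) := by
            rw [ihother i0 (k-1) (by omega)]
            exact hprev i0 (by omega) (k-1) hkm1
          have hleft : pvGet2 dpk (i0+1) (k-1) = pvRecB a b (i0+1) (k-1) :=
            ihfill (k-1) (by omega)
          have hstep : pvStepA a b (i0+1) dpk k
              = pvSet2 dpk (i0+1) k (min (pvGet2 dpk (i0+1) (k-1))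
                  (pvGet2 dpk i0 (k-1) + |a.getD (i0+1) 0 - b.getD k 0|)) := by
            unfold pvStepA
            rw [if_neg (by omega), if_pos hgt]
            simp
          rw [hstep]
          refine ⟨pvShape_set2 _ _ _ _ _ _ ihs, ?_, ?_, ?_⟩
          · intro i' j hne
            rw [pvGet2_set2_ne _ _ _ _ _ _ (Or.inl (fun hc => hne hc.symm))]
            exact ihother i' j hne
          · intro j' hj'
            rcases Nat.lt_succ_iff_lt_or_eq.mp hj' with h | h
            · rw [pvGet2_set2_ne _ _ _ _ _ _ (Or.inr (Nat.ne_of_gt h))]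
              exact ihfill j' h
            · subst h
              rw [pvGet2_set2_same _ _ _ _ hdplen hkrow, hprev', hleft]
              have : pvRecB a b (i0+1) j'
                  = min (pvRecB a b (i0+1) (j'-1)) (pvRecB a b i0 (j'-1) + |a.getD (i0+1) 0 - b.getD j' 0|) := by
                rw [pvRecB]
                rw [if_neg (by omega), if_neg (by omega)]
              rw [this]
          · intro j' hj'
            rw [pvGet2_set2_ne _ _ _ _ _ _ (Or.inr (by omega))]
            exact ihzero j' (by omega)

-- sweeping the rows: after processing rows 0..t-1, those rows agree with pvRecB and
-- later rows are still all zero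
theorem pvOuter (a b : List Int) (n m t : Nat) (ht : t ≤ n)
    (dp : List (List Int)) (hs : pvShape dp n m)
    (hzero : ∀ i' j, pvGet2 dp i' j = 0) :
    pvShape ((List.range t).foldl (fun dp i => (List.range m).foldl (pvStepA a b i) dp) dp) n m ∧
    (∀ i' < t, ∀ j < m,
      pvGet2 ((List.range t).foldl (fun dp i => (List.range m).foldl (pvStepA a b i) dp) dp) i' j = pvRecB a b i' j) ∧
    (∀ i', t ≤ i' → ∀ j,
      pvGet2 ((List.range t).foldl (fun dp i => (List.range m).foldl (pvStepA a b i) dp) dp) i' j = 0) := by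
  induction t with
  | zero =>
      exact ⟨hs, fun i' hi' => absurd hi' (Nat.not_lt_zero _), fun i' _ j => hzero i' j⟩
  | succ t ih =>
      have ht' : t ≤ n := Nat.le_of_succ_le ht
      obtain ⟨ihs, ihfill, ihzero⟩ := ih ht'
      set dpt := (List.range t).foldl (fun dp i => (List.range m).foldl (pvStepA a b i) dp) dp with hdpt
      have hfold : (List.range (t+1)).foldl (fun dp i => (List.range m).foldl (pvStepA a b i) dp) dp
          = (List.range m).foldl (pvStepA a b t) dpt := by
        rw [List.range_succ, List.foldl_append, List.foldl_cons, List.foldl_nil]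
      rw [hfold]
      have htn : t < n := ht
      obtain ⟨rs, rother, rfill, _⟩ :=
        pvInner a b n m t htn m le_rfl dpt ihs ihfill (fun j => ihzero t le_rfl j)
      refine ⟨rs, ?_, ?_⟩
      · intro i' hi' j hj
        rcases Nat.lt_succ_iff_lt_or_eq.mp hi' with h | h
        · rw [rother i' j (Nat.ne_of_lt h)]
          exact ihfill i' h j hj
        · subst h
          exact rfill j hj
      · intro i' hi' j
        rw [rother i' j (by omega)]
        exact ihzero i' (by omega) j

theorem pvShape_dp0 (n m : Nat) :
    pvShape ((List.range n).map (fun _ => (List.range m).map (fun _ => (0:Int)))) n m := by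
  refine ⟨by simp, ?_⟩
  intro r hr
  simp [List.getD_eq_getElem?_getD, hr]

theorem pvZero_dp0 (n m : Nat) (i j : Nat) :
    pvGet2 ((List.range n).map (fun _ => (List.range m).map (fun _ => (0:Int)))) i j = 0 := by
  unfold pvGet2
  by_cases hi : i < n
  · by_cases hj : j < m <;>
      simp [List.getD_eq_getElem?_getD, hi, hj]
  · simp [List.getD_eq_getElem?_getD, hi]

-- ===== VERDICT (by name: the statement is the Claim_ definition above) =====
theorem closestSequence2_spec : Claim_equal_closestSequence2 := by
  intro a b _ hpre
  obtain ⟨ha, hb⟩ := hpre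
  have hn : 0 < a.length := by cases a with | nil => exact absurd rfl ha | cons x xs => simp
  have hm : 0 < b.length := by cases b with | nil => exact absurd rfl hb | cons x xs => simp
  unfold Spec_closestSequence2 closestSequence2 closestSequence2_alt
  obtain ⟨_, hfill, _⟩ :=
    pvOuter a b a.length b.length a.length le_rfl _ (pvShape_dp0 a.length b.length)
      (pvZero_dp0 a.length b.length)
  exact hfill (a.length - 1) (by omega) (b.length - 1) (by omega)
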